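-- pv_equiv track=rewrite | github.com/andresfp97/Ejercicios_Python | 06_listas/sweetco.py | diaMayorIng
-- ===== SOURCE A (Python) =====
-- def diaMayorIng(mat, lst):
--     lsting = []
--     for f in range(len(mat[0])):
--         suma=0
--         for c in range(len(mat)):
--             suma += mat[c][f] * lst[c]
--         lsting.append(suma)
--     mayor = max(lsting)
--     pos = lsting.index(mayor)+1
--     return [pos, mayor]
-- ===== SOURCE B (Python) =====
-- def diaMayorIng(mat, lst):
--     lsting = [0] * len(mat[0])
--     for row, w in zip(mat, lst):
--         lsting = [s + x * w for s, x in zip(lsting, row)]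
--     best_i = 0
--     best_v = lsting[0]
--     for i, x in enumerate(lsting):
--         if x > best_v:
--             best_i, best_v = i, x
--     return [best_i + 1, best_v]
-- ===== Notes on version B (the rewrite author's own statement) =====
-- stated objective: alternative
-- what changed: B accumulates the weighted column sums row-major with a single zip-fold over (row, weight) pairs instead of A's column-major nested index loops, and finds the result with one running-argmax scan (strict >, first maximum wins) instead of A's separate max() pass plus .index() pass.
import Mathlib
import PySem

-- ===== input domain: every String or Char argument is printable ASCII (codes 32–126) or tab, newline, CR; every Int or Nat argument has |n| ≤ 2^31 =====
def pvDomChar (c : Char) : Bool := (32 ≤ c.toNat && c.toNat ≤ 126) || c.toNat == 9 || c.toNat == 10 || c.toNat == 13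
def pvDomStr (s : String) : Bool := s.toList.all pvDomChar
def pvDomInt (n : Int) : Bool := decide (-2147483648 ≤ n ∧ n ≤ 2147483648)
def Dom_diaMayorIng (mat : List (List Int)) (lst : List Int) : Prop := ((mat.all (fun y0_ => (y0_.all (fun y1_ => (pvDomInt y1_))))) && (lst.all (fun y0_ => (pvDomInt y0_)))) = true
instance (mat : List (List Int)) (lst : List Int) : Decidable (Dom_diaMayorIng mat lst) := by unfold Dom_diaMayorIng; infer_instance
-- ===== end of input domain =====

-- B replaces A's column-major nested index loops by one row-major zip-fold and A's
-- max()+.index() double pass by one running-argmax scan (alternative decomposition, same cost).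

-- ===== PORT A =====
-- for f in range(len(mat[0])): suma = 0; for c in range(len(mat)): suma += mat[c][f]*lst[c]; lsting.append(suma)
-- then max(lsting) and lsting.index(mayor)+1.  Indexing uses pyGetD: exact under Pre_ (all indices in range).
def diaMayorIng (mat : List (List Int)) (lst : List Int) : List Int :=
  match PySem.List.pyGet? mat 0 with
  | none => []          -- mat[0]: IndexError on empty mat (excluded by Pre_)
  | some row0 =>
    let lsting : List Int :=
      (PySem.List.pyRange 0 (row0.length : Int) 1).foldl
        (fun acc f =>
          acc ++ [(PySem.List.pyRange 0 (mat.length : Int) 1).foldl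
            (fun suma c =>
              suma + PySem.List.pyGetD (PySem.List.pyGetD mat c []) f 0
                       * PySem.List.pyGetD lst c 0) 0]) []
    match PySem.List.max? lsting (fun x => x) with
    | none => []        -- max([]): ValueError (excluded by Pre_)
    | some mayor =>
      match PySem.List.index? lsting mayor with
      | none => []      -- unreachable: mayor ∈ lsting
      | some pos0 => [(pos0 : Int) + 1, mayor]

-- ===== PORT B =====
-- lsting = [0]*len(mat[0]); for row, w in zip(mat, lst): lsting = [s + x*w for s, x in zip(lsting, row)]
-- then a single running-argmax scan over enumerate(lsting) with strict >.
def diaMayorIng_alt (mat : List (List Int)) (lst : List Int) : List Int :=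
  match PySem.List.pyGet? mat 0 with
  | none => []          -- len(mat[0]): IndexError on empty mat (excluded by Pre_)
  | some row0 =>
    let lsting : List Int :=
      (mat.zip lst).foldl
        (fun acc rw => (acc.zip rw.1).map (fun p => p.1 + p.2 * rw.2))
        (List.replicate row0.length 0)
    match PySem.List.pyGet? lsting 0 with
    | none => []        -- lsting[0]: IndexError when mat[0] is empty (excluded by Pre_)
    | some v0 =>
      let best := (PySem.List.enumerate lsting 0).foldl
        (fun b ix => if ix.2 > b.2 then (ix.1, ix.2) else b) ((0 : Int), v0)
      [best.1 + 1, best.2]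

-- ===== PRECONDITION & SPEC =====
-- Exactly the inputs on which the Python A returns: mat nonempty (mat[0]), its first row
-- nonempty (max of [] is ValueError), lst at least as long as mat (lst[c]) and every row
-- at least as long as the first (mat[c][f]).
def Pre_diaMayorIng (mat : List (List Int)) (lst : List Int) : Prop :=
  mat ≠ [] ∧ mat.headD [] ≠ [] ∧ mat.length ≤ lst.length ∧
    ∀ r ∈ mat, (mat.headD []).length ≤ r.length
instance (mat : List (List Int)) (lst : List Int) : Decidable (Pre_diaMayorIng mat lst) := by
  unfold Pre_diaMayorIng; infer_instance

def pvWitness_diaMayorIng : List (List Int) × List Int := ([[1, 2], [3, 4]], [1, 1])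

def Spec_diaMayorIng (mat : List (List Int)) (lst : List Int) (out : List Int) : Prop := out = diaMayorIng_alt mat lst
instance (mat : List (List Int)) (lst : List Int) (out : List Int) : Decidable (Spec_diaMayorIng mat lst out) := by unfold Spec_diaMayorIng; infer_instance

-- ===== CLAIM (what is proved, stated in full; the proofs are below) =====
def Claim_equal_diaMayorIng : Prop := ∀ (mat : List (List Int)) (lst : List Int), Dom_diaMayorIng mat lst → Pre_diaMayorIng mat lst → Spec_diaMayorIng mat lst (diaMayorIng mat lst)

-- ===== LEMMAS AND PROOFS =====

theorem pvColmap (mat : List (List Int)) (lst : List Int) (k : Nat)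
    (h : mat.length ≤ lst.length) :
    (List.range mat.length).map
      (fun c => (mat.getD c []).getD k 0 * lst.getD c 0)
    = (mat.zip lst).map (fun p => p.1.getD k 0 * p.2) := by
  induction mat generalizing lst with
  | nil => simp
  | cons r rest ih =>
    cases lst with
    | nil => simp at h
    | cons w ws =>
      simp only [List.length_cons, List.range_succ_eq_map, List.map_cons, List.map_map,
        List.zip_cons_cons, List.getD_cons_zero]
      exact congrArg _ (ih ws (by simpa using h))

theorem pvFoldlMaxAllLe (t : List Int) (a : Int) (h : ∀ y ∈ t, y ≤ a) :
    t.foldl max a = a := by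
  rcases PySem.List.foldl_max_mem t a with h1 | h1
  · exact h1
  · exact le_antisymm (h _ h1) (PySem.List.le_foldl_max t a).1

theorem pvZipfold (ps : List (List Int × Int)) (acc : List Int)
    (h : ∀ p ∈ ps, acc.length ≤ p.1.length) :
    ps.foldl (fun acc rw => (acc.zip rw.1).map (fun p => p.1 + p.2 * rw.2)) acc
    = (List.range acc.length).map
        (fun k => acc.getD k 0 + (ps.map (fun p => p.1.getD k 0 * p.2)).sum) := by
  induction ps generalizing acc with
  | nil =>
    simp only [List.foldl_nil, List.map_nil, List.sum_nil, Int.add_zero]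
    exact (List.ext_getElem (by simp) (fun i h1 h2 => by
      simp [List.getD_eq_getElem?_getD, List.getElem?_eq_getElem h2])).symm
  | cons p ps ih =>
    have hp : acc.length ≤ p.1.length := h p (List.mem_cons_self ..)
    set acc' := (acc.zip p.1).map (fun q => q.1 + q.2 * p.2) with hacc'
    have hlen : acc'.length = acc.length := by simp [hacc', Nat.min_eq_left hp]
    rw [List.foldl_cons, ih acc' (fun q hq => hlen ▸ h q (List.mem_cons_of_mem _ hq)), hlen]
    refine List.map_congr_left (fun k hk => ?_)
    have hk' : k < acc.length := List.mem_range.mp hk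
    have h1 : acc'.getD k 0 = acc.getD k 0 + p.1.getD k 0 * p.2 := by
      rw [List.getD_eq_getElem _ _ (hlen ▸ hk'),
          List.getD_eq_getElem _ _ hk', List.getD_eq_getElem _ _ (Nat.lt_of_lt_of_le hk' hp)]
      simp [hacc']
    rw [h1, List.map_cons, List.sum_cons]
    ring

theorem pvIdxOf?OfMem (v : Int) (l : List Int) (h : v ∈ l) :
    List.idxOf? v l = some (l.idxOf v) := by
  induction l with
  | nil => simp at h
  | cons x t ih =>
    by_cases hx : x = v
    · subst hx; simp [List.idxOf?_cons]
    · have hv : v ∈ t := by simpa [hx, Ne.symm hx] using h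
      simp [List.idxOf?_cons, hx, ih hv, beq_iff_eq]

theorem pvArgmaxScan (t : List Int) : ∀ (s bi bv : Int),
    (PySem.List.enumerate t s).foldl
        (fun b ix => if ix.2 > b.2 then (ix.1, ix.2) else b) (bi, bv)
    = if ∀ y ∈ t, y ≤ bv then (bi, bv)
      else (s + (t.idxOf (t.foldl max bv) : Int), t.foldl max bv) := by
  induction t with
  | nil => intro s bi bv; simp [PySem.List.enumerate_nil]
  | cons x t ih =>
    intro s bi bv
    rw [PySem.List.enumerate_cons, List.foldl_cons]
    by_cases hx : x > bv
    · rw [if_pos hx, ih (s + 1) s x]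
      have hmax : (x :: t).foldl max bv = t.foldl max x := by
        simp [List.foldl_cons, max_eq_right (le_of_lt hx)]
      have hnall : ¬ ∀ y ∈ x :: t, y ≤ bv := by
        push_neg; exact ⟨x, List.mem_cons_self .., hx⟩
      rw [if_neg hnall, hmax]
      by_cases hall : ∀ y ∈ t, y ≤ x
      · rw [if_pos hall]
        have hm : t.foldl max x = x := pvFoldlMaxAllLe t x hall
        rw [hm, List.idxOf_cons_self]
        simp
      · rw [if_neg hall]
        have hne : x ≠ t.foldl max x := by
          push_neg at hall
          obtain ⟨y, hy, hxy⟩ := hall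
          have := (PySem.List.le_foldl_max t x).2 y hy
          omega
        rw [List.idxOf_cons_ne _ (hne)]
        simp only [Prod.mk.injEq]
        constructor
        · push_cast [Nat.succ_eq_add_one]; ring
        · trivial
    · rw [if_neg hx, ih (s + 1) bi bv]
      have hbv : max bv x = bv := max_eq_left (by omega)
      have hmax : (x :: t).foldl max bv = t.foldl max bv := by
        rw [List.foldl_cons, hbv]
      by_cases hall : ∀ y ∈ t, y ≤ bv
      · rw [if_pos hall, if_pos (by intro y hy; rcases List.mem_cons.mp hy with h | h
                                    · omega
                                    · exact hall y h)]
      · rw [if_neg hall, if_neg (by intro hc; exact hall (fun y hy => hc y (List.mem_cons_of_mem _ hy)))]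
        have hne : x ≠ t.foldl max bv := by
          push_neg at hall
          obtain ⟨y, hy, hxy⟩ := hall
          have := (PySem.List.le_foldl_max t bv).2 y hy
          omega
        rw [hmax, List.idxOf_cons_ne _ hne]
        simp only [Prod.mk.injEq]
        constructor
        · push_cast [Nat.succ_eq_add_one]; ring
        · trivial

-- On a common nonempty value list L, A's max+index tail equals B's argmax-scan tail.
theorem pvTailEq (L : List Int) (hL : L ≠ []) :
    (match PySem.List.max? L (fun x => x) with
     | none => []
     | some mayor =>
       match PySem.List.index? L mayor with
       | none => []
       | some pos0 => [(pos0 : Int) + 1, mayor])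
    = (match PySem.List.pyGet? L 0 with
       | none => []
       | some v0 =>
         let best := (PySem.List.enumerate L 0).foldl
           (fun b ix => if ix.2 > b.2 then (ix.1, ix.2) else b) ((0 : Int), v0)
         [best.1 + 1, best.2]) := by
  obtain ⟨v0, t, rfl⟩ : ∃ v0 t, L = v0 :: t := by
    cases L with
    | nil => exact absurd rfl hL
    | cons a b => exact ⟨a, b, rfl⟩
  have hMmem : t.foldl max v0 ∈ v0 :: t := by
    rcases PySem.List.foldl_max_mem t v0 with h | h
    · rw [h]; exact List.mem_cons_self ..
    · exact List.mem_cons_of_mem _ h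
  have hidx : PySem.List.index? (v0 :: t) (t.foldl max v0) =
      some ((v0 :: t).idxOf (t.foldl max v0)) := by
    rw [PySem.List.index?_eq_idxOf?]; exact pvIdxOf?OfMem _ _ hMmem
  have hfull : (v0 :: t).foldl max v0 = t.foldl max v0 := by
    rw [List.foldl_cons, max_self]
  simp only [PySem.List.max?_id_cons, hidx, PySem.List.pyGet?_zero_cons,
    pvArgmaxScan (v0 :: t) 0 0 v0, hfull]
  by_cases hall : ∀ y ∈ t, y ≤ v0
  · have hall' : ∀ y ∈ v0 :: t, y ≤ v0 := by
      intro y hy; rcases List.mem_cons.mp hy with h | h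
      · omega
      · exact hall y h
    rw [if_pos hall', pvFoldlMaxAllLe t v0 hall, List.idxOf_cons_self]
    norm_num
  · have hall' : ¬ ∀ y ∈ v0 :: t, y ≤ v0 := by
      intro hc; exact hall (fun y hy => hc y (List.mem_cons_of_mem _ hy))
    rw [if_neg hall']
    norm_num

-- ===== VERDICT (by name: the statement is the Claim_ definition above) =====
theorem diaMayorIng_spec : Claim_equal_diaMayorIng := by
  intro mat lst hdom hpre
  obtain ⟨hne, hrow0, hlen, hrows⟩ := hpre
  obtain ⟨r0, mrest, rfl⟩ : ∃ r0 mrest, mat = r0 :: mrest := by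
    cases mat with
    | nil => exact absurd rfl hne
    | cons a b => exact ⟨a, b, rfl⟩
  have hr0 : r0 ≠ [] := by simpa using hrow0
  unfold Spec_diaMayorIng diaMayorIng diaMayorIng_alt
  simp only [PySem.List.pyGet?_zero_cons]
  have hcol : ∀ k : Nat,
      (List.range (r0 :: mrest).length).map
        (fun c => (((r0 :: mrest).getD c []).getD k 0) * lst.getD c 0)
      = ((r0 :: mrest).zip lst).map (fun p => p.1.getD k 0 * p.2) :=
    fun k => pvColmap _ _ k hlen
  have hA : (PySem.List.pyRange 0 (r0.length : Int) 1).foldl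
      (fun acc f => acc ++ [(PySem.List.pyRange 0 (((r0 :: mrest).length : Nat) : Int) 1).foldl
        (fun suma c => suma + PySem.List.pyGetD (PySem.List.pyGetD (r0 :: mrest) c []) f 0
          * PySem.List.pyGetD lst c 0) 0]) []
      = (List.range r0.length).map
          (fun k => 0 + (((r0 :: mrest).zip lst).map (fun p => p.1.getD k 0 * p.2)).sum) := by
    rw [PySem.List.foldl_append_singleton_eq_map]
    simp only [List.nil_append, PySem.List.pyRange_zero_natCast, List.map_map, Function.comp_def,
      PySem.List.foldl_add, PySem.List.pyGetD_natCast]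
    simp only [hcol]
  have hB : ((r0 :: mrest).zip lst).foldl
      (fun acc rw => (acc.zip rw.1).map (fun p => p.1 + p.2 * rw.2)) (List.replicate r0.length 0)
      = (List.range r0.length).map
          (fun k => 0 + (((r0 :: mrest).zip lst).map (fun p => p.1.getD k 0 * p.2)).sum) := by
    rw [pvZipfold _ _ (by
      intro p hp
      have hm := (List.of_mem_zip hp).1
      have := hrows p.1 hm
      simpa using this)]
    simp only [List.length_replicate]
    refine List.map_congr_left (fun k hk => ?_)
    have hrep : (List.replicate r0.length (0 : Int)).getD k 0 = 0 := by
      simp [List.getD_eq_getElem?_getD, List.getElem?_replicate]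
      split <;> rfl
    rw [hrep]
  rw [hA, hB]
  refine pvTailEq _ ?_
  simp [List.range_eq_nil, List.length_eq_zero_iff, hr0]
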